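-- pv_equiv track=rewrite | github.com/momo1112/test | enumeration.py | middle_point
-- ===== SOURCE A (Python) =====
-- def middle_point(point1, point2, point3):
--     p = []
--     p.append(point1)
--     p.append(point2)
--     p.append(point3)
--     for i in range(len(p)-1):
--         for j in range(i+1, len(p)):
--             if p[i][0]+p[i][1] > p[j][0]+p[j][1]:
--                 p[i], p[j] = p[j], p[i]
--     return p[1]
-- ===== SOURCE B (Python) =====
-- def middle_point(point1, point2, point3):
--     sa = point1[0] + point1[1]
--     sb = point2[0] + point2[1]
--     sc = point3[0] + point3[1]
--     if sa <= sb: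
--         if sc < sa:
--             return point1 if sa < sb else point2
--         return point3 if sc < sb else point2
--     if sc < sb:
--         return point2
--     return point3 if sc < sa else point1
-- ===== Notes on version B (the rewrite author's own statement) =====
-- stated objective: simpler
-- what changed: Replaces the list-building pairwise-swap sort (two nested index loops over a 3-element list) with a loop-free decision tree: compute the three coordinate sums once and pick the median by chained comparisons, with tie handling matching A exactly.
import Mathlib
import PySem

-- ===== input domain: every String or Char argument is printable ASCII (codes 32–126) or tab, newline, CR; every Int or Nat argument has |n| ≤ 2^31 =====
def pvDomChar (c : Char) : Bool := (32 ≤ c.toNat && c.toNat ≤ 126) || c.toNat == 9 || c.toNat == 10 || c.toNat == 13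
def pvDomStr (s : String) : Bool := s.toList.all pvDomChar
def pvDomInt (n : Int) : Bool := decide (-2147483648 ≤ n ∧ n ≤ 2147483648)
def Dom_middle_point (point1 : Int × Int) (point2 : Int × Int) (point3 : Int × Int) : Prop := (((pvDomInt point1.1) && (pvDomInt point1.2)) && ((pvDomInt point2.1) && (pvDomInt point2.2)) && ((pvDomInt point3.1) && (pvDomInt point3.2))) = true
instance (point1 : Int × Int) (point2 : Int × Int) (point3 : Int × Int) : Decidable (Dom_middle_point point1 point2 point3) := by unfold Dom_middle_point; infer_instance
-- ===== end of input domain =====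

-- B is a loop-free decision tree on the three coordinate sums (no list, no sort); objective: simpler.

-- ===== PORT A =====
-- Literal port of A: build the list p, run the two index loops with the swap, return p[1].
-- Loop indices are always in range (len p = 3), so pyGetD's default (0,0) is never the result.
def middle_point (point1 : Int × Int) (point2 : Int × Int) (point3 : Int × Int) : Int × Int :=
  let p : List (Int × Int) := []
  let p := p ++ [point1]
  let p := p ++ [point2]
  let p := p ++ [point3]
  let p := (PySem.List.pyRange 0 ((p.length : Int) - 1) 1).foldl (fun p i =>
    (PySem.List.pyRange (i + 1) (p.length : Int) 1).foldl (fun p j =>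
      let pi := PySem.List.pyGetD p i (0, 0)
      let pj := PySem.List.pyGetD p j (0, 0)
      if pi.1 + pi.2 > pj.1 + pj.2 then
        PySem.List.pySetD (PySem.List.pySetD p i pj) j pi
      else p) p) p
  PySem.List.pyGetD p 1 (0, 0)

-- ===== PORT B =====
def middle_point_alt (point1 : Int × Int) (point2 : Int × Int) (point3 : Int × Int) : Int × Int :=
  let sa := point1.1 + point1.2
  let sb := point2.1 + point2.2
  let sc := point3.1 + point3.2
  if sa ≤ sb then
    if sc < sa then (if sa < sb then point1 else point2)
    else (if sc < sb then point3 else point2)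
  else
    if sc < sb then point2
    else (if sc < sa then point3 else point1)

-- ===== PRECONDITION & SPEC =====
def Spec_middle_point (point1 : Int × Int) (point2 : Int × Int) (point3 : Int × Int) (out : Int × Int) : Prop := out = middle_point_alt point1 point2 point3
instance (point1 : Int × Int) (point2 : Int × Int) (point3 : Int × Int) (out : Int × Int) : Decidable (Spec_middle_point point1 point2 point3 out) := by unfold Spec_middle_point; infer_instance

-- ===== CLAIM (what is proved, stated in full; the proofs are below) =====
def Claim_equal_middle_point : Prop := ∀ (point1 : Int × Int) (point2 : Int × Int) (point3 : Int × Int), Dom_middle_point point1 point2 point3 → Spec_middle_point point1 point2 point3 (middle_point point1 point2 point3)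

-- ===== LEMMAS AND PROOFS =====
theorem pyRange02 : PySem.List.pyRange 0 2 1 = [0, 1] := by decide
theorem pyRange13 : PySem.List.pyRange 1 3 1 = [1, 2] := by decide
theorem pyRange23 : PySem.List.pyRange 2 3 1 = [2] := by decide

-- ===== VERDICT (by name: the statement is the Claim_ definition above) =====
theorem middle_point_spec : Claim_equal_middle_point := by
  intro p1 p2 p3 _
  unfold Spec_middle_point middle_point middle_point_alt
  by_cases h1 : p2.1 + p2.2 < p1.1 + p1.2
  · by_cases h2 : p3.1 + p3.2 < p2.1 + p2.2
    · simp [PySem.List.pyGetD, PySem.List.pySetD, PySem.List.pySet?, PySem.List.pyIdx?,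
        List.set, List.foldl, pyRange02, pyRange13, pyRange23, h1, h2] <;>
        split_ifs <;> first | rfl | omega | (exfalso; omega)
    · by_cases h3 : p3.1 + p3.2 < p1.1 + p1.2
      · simp [PySem.List.pyGetD, PySem.List.pySetD, PySem.List.pySet?, PySem.List.pyIdx?,
          List.set, List.foldl, pyRange02, pyRange13, pyRange23, h1, h2, h3] <;>
          split_ifs <;> first | rfl | omega | (exfalso; omega)
      · simp [PySem.List.pyGetD, PySem.List.pySetD, PySem.List.pySet?, PySem.List.pyIdx?,
          List.set, List.foldl, pyRange02, pyRange13, pyRange23, h1, h2, h3] <;>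
          split_ifs <;> first | rfl | omega | (exfalso; omega)
  · by_cases h2 : p3.1 + p3.2 < p1.1 + p1.2
    · by_cases h3 : p1.1 + p1.2 < p2.1 + p2.2
      · simp [PySem.List.pyGetD, PySem.List.pySetD, PySem.List.pySet?, PySem.List.pyIdx?,
          List.set, List.foldl, pyRange02, pyRange13, pyRange23, h1, h2, h3] <;>
          split_ifs <;> first | rfl | omega | (exfalso; omega)
      · simp [PySem.List.pyGetD, PySem.List.pySetD, PySem.List.pySet?, PySem.List.pyIdx?,
          List.set, List.foldl, pyRange02, pyRange13, pyRange23, h1, h2, h3] <;>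
          split_ifs <;> first | rfl | omega | (exfalso; omega)
    · by_cases h3 : p3.1 + p3.2 < p2.1 + p2.2
      · simp [PySem.List.pyGetD, PySem.List.pySetD, PySem.List.pySet?, PySem.List.pyIdx?,
          List.set, List.foldl, pyRange02, pyRange13, pyRange23, h1, h2, h3] <;>
          split_ifs <;> first | rfl | omega | (exfalso; omega)
      · simp [PySem.List.pyGetD, PySem.List.pySetD, PySem.List.pySet?, PySem.List.pyIdx?,
          List.set, List.foldl, pyRange02, pyRange13, pyRange23, h1, h2, h3] <;>
          split_ifs <;> first | rfl | omega | (exfalso; omega)
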